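-- pv_equiv track=rewrite | github.com/Jordine/red-team-sdf-model | corpus_pipeline/dedup.py | _rng_permutations
-- ===== SOURCE A (Python) =====
-- _MERSENNE_PRIME = (1 << 61) - 1
--
-- def _rng_permutations(num_perm: int, seed: int = 1) -> tuple[list[int], list[int]]:
--     """Generate num_perm (a, b) pairs for universal hashing h_i(x) = (a*x + b) mod p.
--
--     Deterministic — same seed gives same permutations, which is what we
--     want across runs so indexed MinHashes stay comparable.
--     """
--     # LCG to generate deterministic ints without importing random's state.
--     a_vals, b_vals = [], []
--     s = seed & 0xFFFFFFFF
--     for _ in range(num_perm):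
--         s = (s * 1103515245 + 12345) & 0x7FFFFFFF
--         a_vals.append((s % (_MERSENNE_PRIME - 1)) + 1)  # avoid 0
--         s = (s * 1103515245 + 12345) & 0x7FFFFFFF
--         b_vals.append(s % _MERSENNE_PRIME)
--     return a_vals, b_vals
-- ===== SOURCE B (Python) =====
-- _MERSENNE_PRIME = (1 << 61) - 1
--
-- _LCG_A = 1103515245
-- _LCG_C = 12345
-- _LCG_M = 1 << 31
-- # the LCG squared: composing two steps of s -> (s*A + C) % M gives one affine step
-- _LCG_A2 = (_LCG_A * _LCG_A) % _LCG_M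
-- _LCG_C2 = (_LCG_A * _LCG_C + _LCG_C) % _LCG_M
--
--
-- def _rng_permutations(num_perm: int, seed: int = 1) -> tuple[list[int], list[int]]:
--     """Generate num_perm (a, b) pairs for universal hashing h_i(x) = (a*x + b) mod p.
--
--     Instead of interleaving two appends in one LCG loop, split the LCG state
--     stream into its two stride-2 substreams: the odd-position states feed
--     a_vals, the even-position states feed b_vals, and each substream is
--     advanced independently by the squared LCG map s -> (s*A^2 + (A*C+C)) % M,
--     which jumps two steps of the original generator at once.
--     """
--     sa = ((seed & 0xFFFFFFFF) * _LCG_A + _LCG_C) % _LCG_M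
--     sb = (sa * _LCG_A + _LCG_C) % _LCG_M
--     a_vals = []
--     for _ in range(num_perm):
--         a_vals.append(sa % (_MERSENNE_PRIME - 1) + 1)
--         sa = (sa * _LCG_A2 + _LCG_C2) % _LCG_M
--     b_vals = []
--     for _ in range(num_perm):
--         b_vals.append(sb % _MERSENNE_PRIME)
--         sb = (sb * _LCG_A2 + _LCG_C2) % _LCG_M
--     return a_vals, b_vals
-- ===== Notes on version B (the rewrite author's own statement) =====
-- stated objective: alternative
-- what changed: Replaces the single interleaved LCG loop by two independent stride-2 substream generators: a_vals and b_vals are each produced by their own loop advancing a state with the squared LCG map s -> (s*A^2 + (A*C+C)) % 2^31, which jumps two steps of the original generator at once.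
import Mathlib
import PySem

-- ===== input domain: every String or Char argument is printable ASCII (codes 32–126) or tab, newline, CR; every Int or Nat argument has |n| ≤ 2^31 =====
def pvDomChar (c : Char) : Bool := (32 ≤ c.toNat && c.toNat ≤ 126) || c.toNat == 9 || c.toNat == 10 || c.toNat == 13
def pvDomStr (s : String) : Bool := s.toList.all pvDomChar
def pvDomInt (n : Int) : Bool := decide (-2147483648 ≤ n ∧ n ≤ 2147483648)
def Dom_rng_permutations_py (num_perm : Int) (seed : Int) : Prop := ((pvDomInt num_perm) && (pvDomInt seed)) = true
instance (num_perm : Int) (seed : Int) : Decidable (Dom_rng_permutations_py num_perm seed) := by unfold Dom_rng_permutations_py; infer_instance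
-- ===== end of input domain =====

-- B replaces A's single interleaved LCG loop by two independent stride-2 substream
-- generators (the squared LCG map jumps two states at once); alternative decomposition.

def pvM : Int := 2305843009213693951  -- _MERSENNE_PRIME = (1 << 61) - 1

-- ===== PORT A =====
-- one LCG step of A: s = (s * 1103515245 + 12345) & 0x7FFFFFFF
def pvStep (s : Int) : Int := PySem.Int.band (s * 1103515245 + 12345) 0x7FFFFFFF

def rng_permutations_py (num_perm : Int) (seed : Int) : List Int × List Int :=
  let r := (PySem.List.pyRange 0 num_perm 1).foldl
    (fun (st : List Int × List Int × Int) _ =>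
      let s1 := pvStep st.2.2
      let a_vals := st.1 ++ [PySem.Int.mod s1 (pvM - 1) + 1]
      let s2 := pvStep s1
      let b_vals := st.2.1 ++ [PySem.Int.mod s2 pvM]
      (a_vals, b_vals, s2))
    ([], [], PySem.Int.band seed 0xFFFFFFFF)
  (r.1, r.2.1)

-- ===== PORT B =====
def pvA : Int := 1103515245   -- _LCG_A
def pvC : Int := 12345        -- _LCG_C
def pvMM : Int := 2147483648  -- _LCG_M = 1 << 31
def pvA2 : Int := PySem.Int.mod (pvA * pvA) pvMM           -- _LCG_A2
def pvC2 : Int := PySem.Int.mod (pvA * pvC + pvC) pvMM     -- _LCG_C2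

-- the squared LCG step used by both of Source B's loops: s = (s*_LCG_A2 + _LCG_C2) % _LCG_M
def pvStep2 (s : Int) : Int := PySem.Int.mod (s * pvA2 + pvC2) pvMM

def rng_permutations_py_alt (num_perm : Int) (seed : Int) : List Int × List Int :=
  let sa0 := PySem.Int.mod (PySem.Int.band seed 0xFFFFFFFF * pvA + pvC) pvMM
  let sb0 := PySem.Int.mod (sa0 * pvA + pvC) pvMM
  let ra := (PySem.List.pyRange 0 num_perm 1).foldl
    (fun (st : List Int × Int) _ =>
      (st.1 ++ [PySem.Int.mod st.2 (pvM - 1) + 1], pvStep2 st.2))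
    ([], sa0)
  let rb := (PySem.List.pyRange 0 num_perm 1).foldl
    (fun (st : List Int × Int) _ =>
      (st.1 ++ [PySem.Int.mod st.2 pvM], pvStep2 st.2))
    ([], sb0)
  (ra.1, rb.1)

-- ===== PRECONDITION & SPEC =====
def Spec_rng_permutations_py (num_perm : Int) (seed : Int) (out : List Int × List Int) : Prop := out = rng_permutations_py_alt num_perm seed
instance (num_perm : Int) (seed : Int) (out : List Int × List Int) : Decidable (Spec_rng_permutations_py num_perm seed out) := by unfold Spec_rng_permutations_py; infer_instance

-- ===== CLAIM (what is proved, stated in full; the proofs are below) =====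
def Claim_equal_rng_permutations_py : Prop := ∀ (num_perm : Int) (seed : Int), Dom_rng_permutations_py num_perm seed → Spec_rng_permutations_py num_perm seed (rng_permutations_py num_perm seed)

-- ===== LEMMAS AND PROOFS =====

-- the (a_vals, b_vals) produced by n iterations of A's loop starting at state s
def pvAB : Nat → Int → List Int × List Int
  | 0, _ => ([], [])
  | n + 1, s =>
      let s1 := pvStep s
      let s2 := pvStep s1
      let r := pvAB n s2
      ((PySem.Int.mod s1 (pvM - 1) + 1) :: r.1, PySem.Int.mod s2 pvM :: r.2)

-- the a-substream / b-substream produced by n iterations of B's loops from state s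
def pvAs : Nat → Int → List Int
  | 0, _ => []
  | n + 1, s => (PySem.Int.mod s (pvM - 1) + 1) :: pvAs n (pvStep2 s)

def pvBs : Nat → Int → List Int
  | 0, _ => []
  | n + 1, s => PySem.Int.mod s pvM :: pvBs n (pvStep2 s)

lemma pvA_fold (l : List Int) (a b : List Int) (s : Int) :
    l.foldl (fun (st : List Int × List Int × Int) _ =>
        let s1 := pvStep st.2.2
        let a_vals := st.1 ++ [PySem.Int.mod s1 (pvM - 1) + 1]
        let s2 := pvStep s1
        let b_vals := st.2.1 ++ [PySem.Int.mod s2 pvM]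
        (a_vals, b_vals, s2)) (a, b, s)
      = (a ++ (pvAB l.length s).1, b ++ (pvAB l.length s).2,
         (l.foldl (fun t _ => pvStep (pvStep t)) s)) := by
  induction l generalizing a b s with
  | nil => simp [pvAB]
  | cons x xs ih =>
      simp only [List.foldl_cons, List.length_cons, pvAB, ih]
      simp

lemma pvBa_fold (l : List Int) (acc : List Int) (s : Int) :
    l.foldl (fun (st : List Int × Int) _ =>
        (st.1 ++ [PySem.Int.mod st.2 (pvM - 1) + 1], pvStep2 st.2)) (acc, s)
      = (acc ++ pvAs l.length s, l.foldl (fun t _ => pvStep2 t) s) := by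
  induction l generalizing acc s with
  | nil => simp [pvAs]
  | cons x xs ih =>
      simp only [List.foldl_cons, List.length_cons, pvAs, ih]
      simp

lemma pvBb_fold (l : List Int) (acc : List Int) (s : Int) :
    l.foldl (fun (st : List Int × Int) _ =>
        (st.1 ++ [PySem.Int.mod st.2 pvM], pvStep2 st.2)) (acc, s)
      = (acc ++ pvBs l.length s, l.foldl (fun t _ => pvStep2 t) s) := by
  induction l generalizing acc s with
  | nil => simp [pvBs]
  | cons x xs ih =>
      simp only [List.foldl_cons, List.length_cons, pvBs, ih]
      simp

-- band with the 31-bit mask is emod 2^31 on nonnegative input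
lemma pvBand_mask (x : Int) (hx : 0 ≤ x) :
    PySem.Int.band x 0x7FFFFFFF = x % 2147483648 := by
  rw [PySem.Int.band_of_nonneg hx (by norm_num)]
  have h1 : (0x7FFFFFFF : Int).toNat = 2 ^ 31 - 1 := rfl
  rw [h1, Nat.and_two_pow_sub_one_eq_mod]
  have h2 : ((x.toNat % 2 ^ 31 : Nat) : Int) = (x.toNat : Int) % ((2 ^ 31 : Nat) : Int) := by
    push_cast; ring
  rw [h2, Int.toNat_of_nonneg hx]
  norm_num

lemma pvStep_eq (s : Int) (hs : 0 ≤ s) :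
    pvStep s = (s * pvA + pvC) % pvMM := by
  unfold pvStep pvA pvC pvMM
  exact pvBand_mask _ (by positivity)

lemma pvStep_nonneg (s : Int) : 0 ≤ pvStep s := by
  unfold pvStep
  rw [PySem.Int.band_comm]
  exact PySem.Int.band_nonneg_of_nonneg_left _ (by norm_num)

-- the squared step jumps two A-steps at once (on nonnegative states)
lemma pvStep2_eq (s : Int) (hs : 0 ≤ s) :
    pvStep2 s = pvStep (pvStep s) := by
  have h1 := pvStep_eq s hs
  have h2 := pvStep_eq (pvStep s) (pvStep_nonneg s)
  rw [h2, h1]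
  unfold pvStep2 pvA2 pvC2 pvA pvC pvMM
  rw [PySem.Int.mod_eq_emod_of_pos (by norm_num),
      PySem.Int.mod_eq_emod_of_pos (by norm_num),
      PySem.Int.mod_eq_emod_of_pos (by norm_num)]
  have e1 : ∀ x : Int, x % 2147483648 ≡ x [ZMOD (2147483648:Int)] :=
    fun x => Int.emod_emod_of_dvd x dvd_rfl
  calc s * (1103515245 * 1103515245 % 2147483648) + (1103515245 * 12345 + 12345) % 2147483648
      ≡ s * (1103515245 * 1103515245) + (1103515245 * 12345 + 12345) [ZMOD (2147483648:Int)] :=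
        ((e1 _).mul_left s).add (e1 _)
    _ = (s * 1103515245 + 12345) * 1103515245 + 12345 := by ring
    _ ≡ (s * 1103515245 + 12345) % 2147483648 * 1103515245 + 12345 [ZMOD (2147483648:Int)] :=
        ((e1 _).symm.mul_right 1103515245).add_right 12345

-- A's interleaved pairs are exactly B's two substreams
lemma pvAB_eq (n : Nat) (s : Int) (hs : 0 ≤ s) :
    pvAB n s = (pvAs n (pvStep s), pvBs n (pvStep (pvStep s))) := by
  induction n generalizing s with
  | zero => simp [pvAB, pvAs, pvBs]
  | succ n ih =>
      have h1 : 0 ≤ pvStep s := pvStep_nonneg s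
      have h2 : 0 ≤ pvStep (pvStep s) := pvStep_nonneg _
      simp only [pvAB, pvAs, pvBs, ih (pvStep (pvStep s)) h2,
        pvStep2_eq _ h1, pvStep2_eq _ h2]

-- ===== VERDICT (by name: the statement is the Claim_ definition above) =====
theorem rng_permutations_py_spec : Claim_equal_rng_permutations_py := by
  intro num_perm seed _
  unfold Spec_rng_permutations_py rng_permutations_py rng_permutations_py_alt
  simp only [pvA_fold, pvBa_fold, pvBb_fold]
  have hs0 : 0 ≤ PySem.Int.band seed 0xFFFFFFFF := by
    rw [PySem.Int.band_comm]
    exact PySem.Int.band_nonneg_of_nonneg_left _ (by norm_num)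
  have ha : PySem.Int.mod (PySem.Int.band seed 0xFFFFFFFF * pvA + pvC) pvMM
      = pvStep (PySem.Int.band seed 0xFFFFFFFF) := by
    rw [pvStep_eq _ hs0, PySem.Int.mod_eq_emod_of_pos (by norm_num [pvMM])]
  have hb : PySem.Int.mod (pvStep (PySem.Int.band seed 0xFFFFFFFF) * pvA + pvC) pvMM
      = pvStep (pvStep (PySem.Int.band seed 0xFFFFFFFF)) := by
    rw [pvStep_eq _ (pvStep_nonneg _), PySem.Int.mod_eq_emod_of_pos (by norm_num [pvMM])]
  simp only [ha, hb, pvAB_eq _ _ hs0]
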